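-- pv_equiv track=rewrite | github.com/Petingoso/FundamentosP_ex | 06-07/09_lopes143.py | reconhece
-- ===== SOURCE A (Python) =====
-- def reconhece(c):
--     l = False
--     n = False
--     for i in c:
--         if i in ['A','B','C','D'] and n==False:
--             l = True
--         elif i in ['1','2','3','4'] and l==True:
--             n = True
--         else:
--             return False
--     return l and n
-- ===== SOURCE B (Python) =====
-- def reconhece(c):
--     items = list(c)
--     i = 0
--     while i < len(items) and items[i] in ('A', 'B', 'C', 'D'):
--         i += 1
--     if i == 0 or i == len(items):
--         return False
--     return all(x in ('1', '2', '3', '4') for x in items[i:])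
-- ===== Notes on version B (the rewrite author's own statement) =====
-- stated objective: simpler
-- what changed: Replaces the two-flag state machine with an explicit split: scan the A-D letter prefix, require it non-empty and proper, then validate the remaining suffix as all digits 1-4.
import Mathlib
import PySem

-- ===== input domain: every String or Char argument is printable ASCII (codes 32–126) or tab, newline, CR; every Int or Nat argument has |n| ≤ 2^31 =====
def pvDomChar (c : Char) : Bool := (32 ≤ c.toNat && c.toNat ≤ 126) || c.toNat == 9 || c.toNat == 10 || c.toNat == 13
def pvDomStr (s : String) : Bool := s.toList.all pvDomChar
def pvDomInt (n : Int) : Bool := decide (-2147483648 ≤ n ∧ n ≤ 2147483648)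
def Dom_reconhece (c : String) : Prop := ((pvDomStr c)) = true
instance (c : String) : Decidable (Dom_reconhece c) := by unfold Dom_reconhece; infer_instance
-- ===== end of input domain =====

-- B replaces A's two-flag state machine by a letter-prefix scan plus a digit-suffix
-- validation pass: a simpler decomposition, same cost.

-- ===== PORT A =====
-- the for-loop over the characters, carrying (l, n); 'return False' = result false
def reconheceLoop : List Char → Bool → Bool → Bool
  | [], l, n => l && n
  | i :: rest, l, n =>
    if (['A','B','C','D'] : List Char).contains i && n == false then
      reconheceLoop rest true n
    else if (['1','2','3','4'] : List Char).contains i && l == true then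
      reconheceLoop rest l true
    else false

def reconhece (c : String) : Bool := reconheceLoop c.toList false false

-- ===== PORT B =====
-- length of the leading run of letters A-D (the while-loop advancing i)
def letterPrefixLen : List Char → Nat
  | [] => 0
  | x :: xs => if (['A','B','C','D'] : List Char).contains x then letterPrefixLen xs + 1 else 0

def reconhece_alt (c : String) : Bool :=
  let items := c.toList
  let i := letterPrefixLen items
  if i = 0 ∨ i = items.length then false
  else (items.drop i).all (fun x => (['1','2','3','4'] : List Char).contains x)

-- ===== PRECONDITION & SPEC =====
def Spec_reconhece (c : String) (out : Bool) : Prop := out = reconhece_alt c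
instance (c : String) (out : Bool) : Decidable (Spec_reconhece c out) := by unfold Spec_reconhece; infer_instance

-- ===== CLAIM (what is proved, stated in full; the proofs are below) =====
def Claim_equal_reconhece : Prop := ∀ (c : String), Dom_reconhece c → Spec_reconhece c (reconhece c)

-- ===== LEMMAS AND PROOFS =====

-- state (l, n) = (true, true): the rest must be all digits
theorem loop_tt (xs : List Char) :
    reconheceLoop xs true true = xs.all (fun x => (['1','2','3','4'] : List Char).contains x) := by
  induction xs with
  | nil => rfl
  | cons x rest ih =>
    by_cases hL : (['A','B','C','D'] : List Char).contains x = true <;>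
      by_cases hD : (['1','2','3','4'] : List Char).contains x = true <;>
        simp_all [reconheceLoop, List.all_cons]

-- state (l, n) = (true, false): letters* then a non-empty digit run
theorem loop_tf (xs : List Char) :
    reconheceLoop xs true false =
      (if letterPrefixLen xs = xs.length then false
       else (xs.drop (letterPrefixLen xs)).all (fun x => (['1','2','3','4'] : List Char).contains x)) := by
  induction xs with
  | nil => rfl
  | cons x rest ih =>
    by_cases hL : x = 'A' ∨ x = 'B' ∨ x = 'C' ∨ x = 'D'
    · rcases hL with h | h | h | h <;> subst h <;>
        by_cases he : letterPrefixLen rest = rest.length <;>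
          simp [reconheceLoop, letterPrefixLen, ih, he]
    · obtain ⟨h1, h2, h3, h4⟩ : x ≠ 'A' ∧ x ≠ 'B' ∧ x ≠ 'C' ∧ x ≠ 'D' := by
        simpa [not_or] using hL
      by_cases hD : x = '1' ∨ x = '2' ∨ x = '3' ∨ x = '4'
      · rcases hD with h | h | h | h <;> subst h <;>
          simp [reconheceLoop, letterPrefixLen, loop_tt]
      · obtain ⟨g1, g2, g3, g4⟩ : x ≠ '1' ∧ x ≠ '2' ∧ x ≠ '3' ∧ x ≠ '4' := by
          simpa [not_or] using hD
        simp [reconheceLoop, letterPrefixLen, h1, h2, h3, h4, g1, g2, g3, g4]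

-- ===== VERDICT (by name: the statement is the Claim_ definition above) =====
theorem reconhece_spec : Claim_equal_reconhece := by
  intro c _
  unfold Spec_reconhece reconhece reconhece_alt
  cases hxs : c.toList with
  | nil => rfl
  | cons x rest =>
    by_cases hL : (['A','B','C','D'] : List Char).contains x = true
    · have hL' : x = 'A' ∨ x = 'B' ∨ x = 'C' ∨ x = 'D' := by simpa using hL
      rcases hL' with h | h | h | h <;> subst h <;>
        by_cases he : letterPrefixLen rest = rest.length <;>
          simp [reconheceLoop, letterPrefixLen, loop_tf, he]
    · obtain ⟨h1, h2, h3, h4⟩ : x ≠ 'A' ∧ x ≠ 'B' ∧ x ≠ 'C' ∧ x ≠ 'D' := by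
        simpa [not_or] using hL
      simp [reconheceLoop, letterPrefixLen, h1, h2, h3, h4]
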